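-- pv_equiv track=rewrite | github.com/LeanoraMcVittie/AdventofCode | y21/17/part2.py | get_min_x_velocity
-- ===== SOURCE A (Python) =====
-- def get_min_x_velocity(min_x_target, max_x_target):
-- 	x_pos = 0
-- 	i = 0
-- 	while True:
-- 		x_pos += i
-- 		if x_pos > max_x_target:
-- 			raise Exception("this calcualtion won't work")
-- 		if x_pos > min_x_target:
-- 			return i
-- 		i += 1
-- ===== SOURCE B (Python) =====
-- def get_min_x_velocity(min_x_target, max_x_target):
-- 	# Binary search for the smallest i with i*(i+1)//2 > min_x_target,
-- 	# instead of A's linear scan over candidate velocities.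
-- 	if min_x_target < 0:
-- 		i = 0
-- 	else:
-- 		lo, hi = 0, min_x_target + 1  # tri(min_x_target + 1) > min_x_target
-- 		while lo < hi:
-- 			mid = (lo + hi) // 2
-- 			if mid * (mid + 1) // 2 > min_x_target:
-- 				hi = mid
-- 			else:
-- 				lo = mid + 1
-- 		i = lo
-- 	if i * (i + 1) // 2 > max_x_target:
-- 		raise Exception("this calcualtion won't work")
-- 	return i
-- ===== Notes on version B (the rewrite author's own statement) =====
-- stated objective: faster
-- what changed: Replaces A's linear scan of candidate velocities (accumulating triangular sums one step at a time) by a binary search for the smallest i with i*(i+1)//2 > min_x_target, followed by a single check against max_x_target.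
import Mathlib
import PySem

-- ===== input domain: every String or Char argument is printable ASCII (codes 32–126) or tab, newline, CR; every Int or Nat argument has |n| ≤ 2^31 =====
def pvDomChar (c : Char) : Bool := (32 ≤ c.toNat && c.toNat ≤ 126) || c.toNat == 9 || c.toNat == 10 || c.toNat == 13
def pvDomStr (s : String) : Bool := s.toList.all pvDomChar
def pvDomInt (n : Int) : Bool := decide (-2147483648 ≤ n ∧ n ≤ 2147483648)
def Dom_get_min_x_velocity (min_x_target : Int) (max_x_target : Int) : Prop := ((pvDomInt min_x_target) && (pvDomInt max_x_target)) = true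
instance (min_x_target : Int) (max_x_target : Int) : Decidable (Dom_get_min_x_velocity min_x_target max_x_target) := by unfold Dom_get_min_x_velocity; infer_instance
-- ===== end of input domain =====

-- B replaces A's linear scan over candidate velocities by a binary search for the
-- smallest i with i*(i+1)//2 > min_x_target (objective: faster). Equivalence is
-- about the return value on inputs where A returns (Pre_); on the rest both raise.

-- ===== PORT A =====
-- A's `while True` loop; fuel 100000 is never exhausted on Dom ∩ Pre (proved below);
-- the `raise` branch is ported as 0 (excluded by Pre_).
def pvLoopA (min_x_target max_x_target : Int) (x_pos i : Int) : Nat → Int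
  | 0 => 0
  | fuel + 1 =>
    let x := x_pos + i
    if x > max_x_target then 0
    else if x > min_x_target then i
    else pvLoopA min_x_target max_x_target x (i + 1) fuel

def get_min_x_velocity (min_x_target : Int) (max_x_target : Int) : Int :=
  pvLoopA min_x_target max_x_target 0 0 100000

-- ===== PORT B =====
-- the `while lo < hi` binary-search loop of Source B; fuel ((m+1).toNat + 1) exceeds the
-- iteration count bound hi - lo and is never exhausted (proved below)
def pvBS (m : Int) (lo hi : Int) : Nat → Int
  | 0 => lo
  | fuel + 1 =>
    if lo < hi then
      let mid := PySem.Int.floordiv (lo + hi) 2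
      if PySem.Int.floordiv (mid * (mid + 1)) 2 > m then pvBS m lo mid fuel
      else pvBS m (mid + 1) hi fuel
    else lo

def get_min_x_velocity_alt (min_x_target : Int) (max_x_target : Int) : Int :=
  let i := if min_x_target < 0 then 0 else pvBS min_x_target 0 (min_x_target + 1) ((min_x_target + 1).toNat + 1)
  if PySem.Int.floordiv (i * (i + 1)) 2 > max_x_target then 0  -- raise, excluded by Pre_
  else i

-- ===== PRECONDITION & SPEC =====
-- triangular number i*(i+1)//2 (Python //)
def pvTri (i : Int) : Int := PySem.Int.floordiv (i * (i + 1)) 2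
-- integer square root by binary search (structural fuel recursion, so it kernel-reduces)
def pvSqrtAux (n : Nat) (lo hi : Nat) : Nat → Nat
  | 0 => lo
  | f + 1 =>
    if hi - lo ≤ 1 then lo
    else
      let mid := (lo + hi) / 2
      if mid * mid ≤ n then pvSqrtAux n mid hi f else pvSqrtAux n lo mid f

def pvSqrt (n : Nat) : Nat := pvSqrtAux n 0 (n + 1) (n + 2)

-- the smallest i ≥ 0 with pvTri i > m, in closed form via the integer square root
def pvImin (m : Int) : Int :=
  if m < 0 then 0 else ((pvSqrt (8 * m.toNat + 1) + 1) / 2 : Nat)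

-- Pre_ excludes exactly the inputs on which A raises its Exception
-- (the first triangular number above min_x_target also exceeds max_x_target).
def Pre_get_min_x_velocity (min_x_target : Int) (max_x_target : Int) : Prop :=
  pvTri (pvImin min_x_target) ≤ max_x_target
instance (min_x_target : Int) (max_x_target : Int) : Decidable (Pre_get_min_x_velocity min_x_target max_x_target) := by unfold Pre_get_min_x_velocity; infer_instance

def pvWitness_get_min_x_velocity : Int × Int := (3, 10)

def Spec_get_min_x_velocity (min_x_target : Int) (max_x_target : Int) (out : Int) : Prop := out = get_min_x_velocity_alt min_x_target max_x_target
instance (min_x_target : Int) (max_x_target : Int) (out : Int) : Decidable (Spec_get_min_x_velocity min_x_target max_x_target out) := by unfold Spec_get_min_x_velocity; infer_instance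

-- ===== CLAIM (what is proved, stated in full; the proofs are below) =====
def Claim_equal_get_min_x_velocity : Prop := ∀ (min_x_target : Int) (max_x_target : Int), Dom_get_min_x_velocity min_x_target max_x_target → Pre_get_min_x_velocity min_x_target max_x_target → Spec_get_min_x_velocity min_x_target max_x_target (get_min_x_velocity min_x_target max_x_target)

-- ===== LEMMAS AND PROOFS =====

theorem pvTri_two_mul (i : Int) : 2 * pvTri i = i * (i + 1) := by
  have he : (2 : Int) ∣ i * (i + 1) := (Int.even_mul_succ_self i).two_dvd
  simp only [pvTri, PySem.Int.floordiv, Int.fdiv_eq_ediv]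
  exact (Int.two_mul_ediv_two_of_even (even_iff_two_dvd.mpr he)).symm ▸ by
    obtain ⟨k, hk⟩ := he; simp [hk, Int.mul_ediv_cancel_left]

theorem pvTri_mono {i j : Int} (hi : 0 ≤ i) (hij : i ≤ j) : pvTri i ≤ pvTri j := by
  nlinarith [pvTri_two_mul i, pvTri_two_mul j]

theorem pvImin_nonneg (m : Int) : 0 ≤ pvImin m := by
  unfold pvImin; split <;> positivity

theorem pvSqrtAux_spec (n : Nat) : ∀ (f lo hi : Nat), lo < hi → lo * lo ≤ n →
    n < hi * hi → hi - lo ≤ f →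
    pvSqrtAux n lo hi f * pvSqrtAux n lo hi f ≤ n ∧
      n < (pvSqrtAux n lo hi f + 1) * (pvSqrtAux n lo hi f + 1) := by
  intro f
  induction f with
  | zero => intro lo hi hlt _ _ hf; omega
  | succ f ih =>
    intro lo hi hlt hlo hhi hf
    simp only [pvSqrtAux]
    by_cases h1 : hi - lo ≤ 1
    · rw [if_pos h1]
      have : hi = lo + 1 := by omega
      subst this
      exact ⟨hlo, hhi⟩
    · rw [if_neg h1]
      set mid := (lo + hi) / 2 with hmid
      have hb : lo < mid ∧ mid < hi := by omega
      by_cases h2 : mid * mid ≤ n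
      · rw [if_pos h2]
        exact ih mid hi hb.2 h2 hhi (by omega)
      · rw [if_neg h2]
        exact ih lo mid hb.1 hlo (by omega) (by omega)

theorem pvSqrt_le (n : Nat) : pvSqrt n * pvSqrt n ≤ n :=
  (pvSqrtAux_spec n (n + 2) 0 (n + 1) (by omega) (by omega) (by nlinarith) (by omega)).1

theorem pvSqrt_lt (n : Nat) : n < (pvSqrt n + 1) * (pvSqrt n + 1) :=
  (pvSqrtAux_spec n (n + 2) 0 (n + 1) (by omega) (by omega) (by nlinarith) (by omega)).2

theorem pvImin_spec (m : Int) (h : 0 ≤ m) :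
    2 * m < pvImin m * (pvImin m + 1) ∧ (pvImin m - 1) * pvImin m ≤ 2 * m := by
  unfold pvImin
  rw [if_neg (by omega)]
  have hm : ((m.toNat : Nat) : Int) = m := by omega
  set n : Nat := m.toNat with hn
  set s : Nat := pvSqrt (8 * n + 1) with hs
  have h1 : s ^ 2 ≤ 8 * n + 1 := by rw [pow_two]; exact pvSqrt_le (8 * n + 1)
  have h2 : 8 * n + 1 < (s + 1) ^ 2 := by rw [pow_two]; exact pvSqrt_lt (8 * n + 1)
  set i : Nat := (s + 1) / 2 with hi
  have hsi : s + 1 = 2 * i ∨ s = 2 * i := by omega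
  have H1 : ((s : Int)) ^ 2 ≤ 8 * m + 1 := by
    calc ((s : Int)) ^ 2 = ((s ^ 2 : Nat) : Int) := by push_cast; ring
      _ ≤ ((8 * n + 1 : Nat) : Int) := by exact_mod_cast h1
      _ = 8 * m + 1 := by push_cast [hm]; ring
  have H2 : 8 * m + 1 < ((s : Int) + 1) ^ 2 := by
    calc 8 * m + 1 = ((8 * n + 1 : Nat) : Int) := by push_cast [hm]; ring
      _ < (((s + 1) ^ 2 : Nat) : Int) := by exact_mod_cast h2
      _ = ((s : Int) + 1) ^ 2 := by push_cast; ring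
  have HI : (s : Int) + 1 = 2 * (i : Int) ∨ (s : Int) = 2 * (i : Int) := by
    rcases hsi with hc | hc
    · left; exact_mod_cast congrArg (Nat.cast : Nat → Int) hc
    · right; exact_mod_cast congrArg (Nat.cast : Nat → Int) hc
  have hIpos : 0 ≤ (i : Int) := by positivity
  constructor
  · rcases HI with hc | hc
    · nlinarith
    · nlinarith
  · rcases HI with hc | hc
    · nlinarith
    · have h4 : 4 * (i : Int) ^ 2 ≤ 8 * m + 1 := by nlinarith
      have h4' : (i : Int) ^ 2 ≤ 2 * m := by nlinarith
      nlinarith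

theorem pvImin_gt (m : Int) : pvTri (pvImin m) > m := by
  by_cases h : m < 0
  · unfold pvImin
    rw [if_pos h]
    have : pvTri 0 = 0 := by decide
    omega
  · have := (pvImin_spec m (by omega)).1
    have h2t := pvTri_two_mul (pvImin m)
    omega

theorem pvImin_pred (m : Int) (h : 0 < pvImin m) : pvTri (pvImin m - 1) ≤ m := by
  by_cases hneg : m < 0
  · exfalso; unfold pvImin at h; rw [if_pos hneg] at h; omega
  · have hp := (pvImin_spec m (by omega)).2
    have h2t := pvTri_two_mul (pvImin m - 1)
    nlinarith

theorem pvImin_least (m i : Int) (h0 : 0 ≤ i) (h : pvTri i > m) : pvImin m ≤ i := by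
  by_contra hlt
  push_neg at hlt
  have h1 : 0 < pvImin m := by omega
  have h2 : i ≤ pvImin m - 1 := by omega
  have := pvTri_mono h0 h2
  have := pvImin_pred m h1
  omega

-- A's loop returns pvImin m when it does not raise
theorem pvLoopA_eq (m M : Int) (hPre : pvTri (pvImin m) ≤ M) :
    ∀ (fuel : Nat) (i : Int), 0 ≤ i → i ≤ pvImin m →
      (pvImin m - i).toNat < fuel →
      pvLoopA m M (pvTri i - i) i fuel = pvImin m := by
  intro fuel
  induction fuel with
  | zero => intro i _ _ hf; omega
  | succ f ih =>
    intro i hi hile hf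
    have hx : pvTri i - i + i = pvTri i := by ring
    simp only [pvLoopA, hx]
    have hmono := pvTri_mono hi hile
    rw [if_neg (by omega)]
    by_cases hgt : pvTri i > m
    · have := pvImin_least m i hi hgt
      rw [if_pos (by omega)]
      omega
    · rw [if_neg (by omega)]
      have hne : i ≠ pvImin m := by
        intro he; rw [he] at hgt; exact hgt (pvImin_gt m)
      have hstep : pvTri (i + 1) - (i + 1) = pvTri i := by
        have h1 := pvTri_two_mul i
        have h2 := pvTri_two_mul (i + 1)
        nlinarith
      rw [← hstep]
      exact ih (i + 1) (by omega) (by omega) (by omega)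

-- the binary search returns pvImin m when the fuel exceeds hi - lo
theorem pvBS_eq (m : Int) : ∀ (fuel : Nat) (lo hi : Int), 0 ≤ lo → lo ≤ pvImin m →
    pvImin m ≤ hi → (hi - lo).toNat < fuel → pvBS m lo hi fuel = pvImin m := by
  intro fuel
  induction fuel with
  | zero => intro lo hi _ _ _ hf; omega
  | succ f ih =>
    intro lo hi h0 h1 h2 hf
    simp only [pvBS]
    by_cases hlt : lo < hi
    · rw [if_pos hlt]
      set mid := PySem.Int.floordiv (lo + hi) 2 with hmid
      have hmid' : mid = (lo + hi) / 2 := by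
        rw [hmid]; simp [PySem.Int.floordiv, Int.fdiv_eq_ediv]
      by_cases hgt : PySem.Int.floordiv (mid * (mid + 1)) 2 > m
      · rw [if_pos hgt]
        have hle : pvImin m ≤ mid := pvImin_least m mid (by omega) (by simpa [pvTri] using hgt)
        exact ih lo mid h0 h1 hle (by omega)
      · rw [if_neg hgt]
        have hmlt : mid < pvImin m := by
          by_contra hge
          push_neg at hge
          have hmono := pvTri_mono (pvImin_nonneg m) hge
          have hgt2 := pvImin_gt m
          exact hgt (by simp only [pvTri] at hmono hgt2 ⊢; omega)
        exact ih (mid + 1) hi (by omega) (by omega) h2 (by omega)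
    · rw [if_neg hlt]
      omega

-- pvImin is small on Dom: pvTri 65536 > 2^31 ≥ m
theorem pvImin_small (m : Int) (hm : m ≤ 2147483648) : pvImin m ≤ 65536 := by
  apply pvImin_least m 65536 (by norm_num)
  have : pvTri 65536 = 2147516416 := by decide
  omega

-- ===== VERDICT (by name: the statement is the Claim_ definition above) =====
theorem get_min_x_velocity_spec : Claim_equal_get_min_x_velocity := by
  intro m M hDom hPre
  unfold Spec_get_min_x_velocity
  unfold Pre_get_min_x_velocity at hPre
  have hDom' : m ≤ 2147483648 := by
    simp only [Dom_get_min_x_velocity, pvDomInt, Bool.and_eq_true, decide_eq_true_eq] at hDom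
    omega
  -- A's side
  have hA : get_min_x_velocity m M = pvImin m := by
    have h0 : pvTri 0 - 0 = 0 := by decide
    have := pvLoopA_eq m M hPre 100000 0 (by norm_num) (pvImin_nonneg m)
      (by have := pvImin_small m hDom'; omega)
    unfold get_min_x_velocity
    rw [← h0] at *
    simpa [h0] using this
  -- B's side
  have hB : get_min_x_velocity_alt m M = pvImin m := by
    unfold get_min_x_velocity_alt
    have hi : (if m < 0 then (0 : Int) else pvBS m 0 (m + 1) ((m + 1).toNat + 1)) = pvImin m := by
      split
      · rename_i hneg; unfold pvImin; rw [if_pos hneg]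
      · rename_i hpos
        push_neg at hpos
        apply pvBS_eq m ((m + 1).toNat + 1) 0 (m + 1) le_rfl (pvImin_nonneg m) ?_ (by omega)
        apply pvImin_least m (m + 1) (by omega)
        have := pvTri_two_mul (m + 1)
        nlinarith
    simp only [hi]
    rw [if_neg (by simpa [pvTri] using hPre)]
  rw [hA, hB]
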